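-- pv_equiv track=rewrite | github.com/weka511/bioinformatics | rear.py | leaderBoardSort
-- ===== SOURCE A (Python) =====
-- def leaderBoardSort(S,N=5):
--     def get_all_reversals(S):
--         def reverse(i,j):
--             def reverse_segment(S):
--                 return S[::-1]
--             return S[:i] + reverse_segment(S[i:j+1]) + S[j+1:]
--         return [reverse(i,j) for j in range(len(S)) for i in range(j)]
--     #def get_score(s):
--         #return sum([abs(s[i+1]-s[i]) for i in range(len(s)-1)])
--     def get_breakpoints(S):
--         return [1 if S[i+1]-S[i]>0 else -1 for i in range(len(S)-1) if abs(S[i+1]-S[i])>1]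
--     #def reversals(s):
--         #result = []
--         #for i in range(1,len(s)):
--             #for j in range(i+1,len(s)-1):
--                 #result.append(s[:i]+s[i:j+1][::-1]+s[j+1:])
--         #return result
--
--     def create_leaders(leaders):
--         permutation = [get_all_reversals(s) for s,_ in leaders]
--         new_list    = [(p,len(get_breakpoints(p))) for ps in permutation for p in ps]
--         #print (len(new_list),new_list)
--         min_breakpoint_count = min([c for (p,c) in new_list])
--         #print (min_breakpoint_count)
--         result               = []
--         while len(result)<N:
--             result = result + [(p,c) for (p,c) in new_list if c==min_breakpoint_count]
--             min_breakpoint_count+=1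
--         return result
--         #sorted_list = sorted(new_list, key=lambda tup: tup[1])
--         #return sorted_list if len(sorted_list)<=N else sorted_list[:N]
--
--     reversalDistance = 0
--     leaders    = [(S,len(get_breakpoints(S)))]
--
--     for k in range(1,len(S)+1):
--         leaders = create_leaders(leaders)
--         reversalDistance+=1
--         s,b = leaders[0]
--         if b==0:
--             if s[0]<s[1]:
--                 return reversalDistance
--             else:
--                 return reversalDistance+1
--     return reversalDistance
-- ===== SOURCE B (Python) =====
-- def leaderBoardSort(S, N=5):
--     # Different strategy: candidates carry their breakpoint count computed
--     # incrementally from the parent's count via the two reversal boundaries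
--     # (O(1) per candidate instead of a full rescan), and the beam is cut by an
--     # order statistic: sort once by count, read the N-th smallest count as the
--     # threshold, and keep everything at or below it.  The driver is recursive.
--     def bp(a, b):
--         return 1 if abs(b - a) > 1 else 0
--
--     def count_breakpoints(s):
--         total = 0
--         for k in range(len(s) - 1):
--             total += bp(s[k], s[k + 1])
--         return total
--
--     def children(s, base):
--         # all reversals of s, counts adjusted at the two cut points only
--         n = len(s)
--         out = []
--         for j in range(n):
--             for i in range(j):
--                 c = base
--                 if i > 0:
--                     c += bp(s[i - 1], s[j]) - bp(s[i - 1], s[i])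
--                 if j < n - 1:
--                     c += bp(s[i], s[j + 1]) - bp(s[j], s[j + 1])
--                 out.append((s[:i] + s[i:j + 1][::-1] + s[j + 1:], c))
--         return out
--
--     def create_leaders(leaders):
--         ordered = sorted((pc for s, b in leaders for pc in children(s, b)),
--                          key=lambda t: t[1])
--         c_stop = ordered[N - 1][1]
--         return [pc for pc in ordered if pc[1] <= c_stop]
--
--     def run(leaders, rounds, dist):
--         if rounds == 0:
--             return dist
--         leaders = create_leaders(leaders)
--         s, b = leaders[0]
--         if b == 0:
--             return dist + 1 if s[0] < s[1] else dist + 2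
--         return run(leaders, rounds - 1, dist + 1)
--
--     return run([(S, count_breakpoints(S))], len(S), 0)
-- ===== Notes on version B (the rewrite author's own statement) =====
-- stated objective: alternative
-- what changed: Candidates now carry breakpoint counts computed incrementally from the parent's count via the two reversal boundary deltas (no per-candidate rescan), the beam is cut by an order statistic (one stable sort by count, threshold = the N-th smallest count, keep everything at or below it) instead of A's repeated whole-list filtering per threshold value, and the driver is recursive.
-- outside the precondition, e.g. on leaderBoardSort([0], 5): A raises ValueError, B raises IndexError; on leaderBoardSort([1, 2], 0): A raises IndexError, B returns 2; on leaderBoardSort([2, 1, 3], 4): A does not finish within the time limit, B raises IndexError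
import Mathlib
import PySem

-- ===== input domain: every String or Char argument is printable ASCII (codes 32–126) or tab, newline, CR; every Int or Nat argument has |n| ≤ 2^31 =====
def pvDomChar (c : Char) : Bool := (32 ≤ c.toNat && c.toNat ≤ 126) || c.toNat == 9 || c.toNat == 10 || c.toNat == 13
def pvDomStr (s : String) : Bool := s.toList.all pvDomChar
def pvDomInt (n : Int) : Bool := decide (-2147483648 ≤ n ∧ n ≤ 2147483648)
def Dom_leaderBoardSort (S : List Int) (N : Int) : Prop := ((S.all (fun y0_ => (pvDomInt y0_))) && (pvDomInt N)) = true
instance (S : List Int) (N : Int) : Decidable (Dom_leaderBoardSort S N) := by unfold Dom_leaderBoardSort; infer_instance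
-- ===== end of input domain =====

-- B replaces A's per-candidate breakpoint recount by an O(1) boundary-delta update of the
-- parent's count, and A's per-threshold rescans by one stable sort cut at the N-th smallest
-- count (keeping ties); the driver is recursive.  Same return value on Pre_.

-- ===== PORT A =====

-- reverse(i,j) = S[:i] + S[i:j+1][::-1] + S[j+1:]  (slice? with step -1 never raises, getD [] is exact)
def pvReverseA (s : List Int) (i j : Int) : List Int :=
  PySem.List.slice s none (some i) ++
    ((PySem.List.slice? (PySem.List.slice s (some i) (some (j + 1))) none none (-1)).getD []) ++
    PySem.List.slice s (some (j + 1)) none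

-- [reverse(i,j) for j in range(len(S)) for i in range(j)]
def pvGetAllReversalsA (s : List Int) : List (List Int) :=
  (PySem.List.pyRange 0 (s.length : Int) 1).flatMap (fun j =>
    (PySem.List.pyRange 0 j 1).map (fun i => pvReverseA s i j))

-- [1 if S[i+1]-S[i]>0 else -1 for i in range(len(S)-1) if abs(S[i+1]-S[i])>1]
def pvGetBreakpointsA (s : List Int) : List Int :=
  ((PySem.List.pyRange 0 ((s.length : Int) - 1) 1).filter
      (fun i => decide (1 < |PySem.List.pyGetD s (i + 1) 0 - PySem.List.pyGetD s i 0|))).map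
    (fun i => if 0 < PySem.List.pyGetD s (i + 1) 0 - PySem.List.pyGetD s i 0 then (1 : Int) else -1)

-- the 'while len(result)<N' loop; fuel only makes the recursion total, under Pre_ it is never exhausted
def pvWhileA (newList : List (List Int × Int)) (N : Int) :
    Nat → Int → List (List Int × Int) → List (List Int × Int)
  | 0, _, result => result
  | fuel + 1, m, result =>
    if (result.length : Int) < N then
      pvWhileA newList N fuel (m + 1) (result ++ newList.filter (fun pc => pc.2 == m))
    else result

def pvCreateLeadersA (N : Int) (fuel : Nat) (leaders : List (List Int × Int)) :
    List (List Int × Int) :=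
  let permutation := leaders.map (fun sb => pvGetAllReversalsA sb.1)
  let newList := permutation.flatMap (fun ps =>
    ps.map (fun p => (p, ((pvGetBreakpointsA p).length : Int))))
  match PySem.List.min? (newList.map (fun pc => pc.2)) (fun c => c) with
  | none => []            -- Python raises ValueError on min([]); excluded by Pre_
  | some m => pvWhileA newList N fuel m []

-- for k in range(1,len(S)+1): …
def pvLoopA (N : Int) (fuel : Nat) : Nat → Int → List (List Int × Int) → Int
  | 0, dist, _ => dist
  | k + 1, dist, leaders =>
    let leaders' := pvCreateLeadersA N fuel leaders
    match leaders' with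
    | [] => 0               -- Python raises IndexError on leaders[0]; excluded by Pre_
    | (s, b) :: _ =>
      if b == 0 then
        if PySem.List.pyGetD s 0 0 < PySem.List.pyGetD s 1 0 then dist + 1 else dist + 1 + 1
      else pvLoopA N fuel k (dist + 1) leaders'

def leaderBoardSort (S : List Int) (N : Int) : Int :=
  pvLoopA N (S.length + 1) S.length 0 [(S, ((pvGetBreakpointsA S).length : Int))]

-- ===== PORT B =====

-- bp(a, b) = 1 if abs(b - a) > 1 else 0
def pvBpB (a b : Int) : Int := if 1 < |b - a| then 1 else 0

-- count_breakpoints: running total of bp over adjacent positions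
def pvCountBreakpointsB (s : List Int) : Int :=
  (PySem.List.pyRange 0 ((s.length : Int) - 1) 1).foldl
    (fun total k => total + pvBpB (PySem.List.pyGetD s k 0) (PySem.List.pyGetD s (k + 1) 0)) 0

-- the two if-guarded count adjustments of children(s, base) at the cut points i and j
def pvChildCount (s : List Int) (base i j : Int) : Int :=
  let c := base
  let c := if 0 < i then
      c + (pvBpB (PySem.List.pyGetD s (i - 1) 0) (PySem.List.pyGetD s j 0)
           - pvBpB (PySem.List.pyGetD s (i - 1) 0) (PySem.List.pyGetD s i 0)) else c
  let c := if j < (s.length : Int) - 1 then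
      c + (pvBpB (PySem.List.pyGetD s i 0) (PySem.List.pyGetD s (j + 1) 0)
           - pvBpB (PySem.List.pyGetD s j 0) (PySem.List.pyGetD s (j + 1) 0)) else c
  c

-- children(s, base): every reversal paired with its count, adjusted at the two cut points only
def pvChildrenB (s : List Int) (base : Int) : List (List Int × Int) :=
  (PySem.List.pyRange 0 (s.length : Int) 1).foldl (fun out j =>
    (PySem.List.pyRange 0 j 1).foldl (fun out i =>
      out ++ [(PySem.List.slice s none (some i) ++
               ((PySem.List.slice? (PySem.List.slice s (some i) (some (j + 1))) none none (-1)).getD []) ++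
               PySem.List.slice s (some (j + 1)) none, pvChildCount s base i j)]) out) []

-- create_leaders: sort once by count, cut at the N-th smallest count, keep ties
def pvCreateLeadersB (N : Int) (leaders : List (List Int × Int)) : List (List Int × Int) :=
  let ordered := (leaders.flatMap (fun sb => pvChildrenB sb.1 sb.2)).mergeSort
    (fun a b => decide (a.2 ≤ b.2))   -- Python's sorted(key=itemgetter(1)): a stable sort by count
  let cStop := (PySem.List.pyGetD ordered (N - 1) ([], 0)).2   -- ordered[N-1] raises under Pre_'s negation only
  ordered.filter (fun pc => decide (pc.2 ≤ cStop))

-- run(leaders, rounds, dist), recursive driver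
def pvRunB (N : Int) : Nat → Int → List (List Int × Int) → Int
  | 0, dist, _ => dist
  | rounds + 1, dist, leaders =>
    let leaders' := pvCreateLeadersB N leaders
    match leaders' with
    | [] => 0               -- Python raises IndexError on leaders[0]; excluded by Pre_
    | (s, b) :: _ =>
      if b == 0 then
        if PySem.List.pyGetD s 0 0 < PySem.List.pyGetD s 1 0 then dist + 1 else dist + 2
      else pvRunB N rounds (dist + 1) leaders'

def leaderBoardSort_alt (S : List Int) (N : Int) : Int :=
  pvRunB N S.length 0 [(S, pvCountBreakpointsB S)]

-- ===== PRECONDITION & SPEC =====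

-- Pre_ is exactly A's halting domain: len(S) == 1 makes A raise ValueError on min([]);
-- for len(S) >= 2, N < 1 makes A raise IndexError on leaders[0] and
-- 2*N > len(S)*(len(S)-1) (more leaders demanded than reversals exist) makes A's
-- while-loop diverge.  len(S) == 0 returns 0 for every N.
def Pre_leaderBoardSort (S : List Int) (N : Int) : Prop :=
  S = [] ∨ (2 ≤ S.length ∧ 1 ≤ N ∧ 2 * N ≤ (S.length : Int) * ((S.length : Int) - 1))
instance (S : List Int) (N : Int) : Decidable (Pre_leaderBoardSort S N) := by
  unfold Pre_leaderBoardSort; infer_instance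

def pvWitness_leaderBoardSort : List Int × Int := ([2, 4, 3], 2)

def Spec_leaderBoardSort (S : List Int) (N : Int) (out : Int) : Prop := out = leaderBoardSort_alt S N
instance (S : List Int) (N : Int) (out : Int) : Decidable (Spec_leaderBoardSort S N out) := by
  unfold Spec_leaderBoardSort; infer_instance

-- ===== CLAIM (what is proved, stated in full; the proofs are below) =====
def Claim_equal_leaderBoardSort : Prop := ∀ (S : List Int) (N : Int), Dom_leaderBoardSort S N → Pre_leaderBoardSort S N → Spec_leaderBoardSort S N (leaderBoardSort S N)

-- ===== LEMMAS AND PROOFS =====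

-- ---------- breakpoint counts: A's list length as a recursive pair count ----------

def pvCnt : List Int → Int
  | [] => 0
  | [_] => 0
  | a :: b :: t => pvBpB a b + pvCnt (b :: t)

lemma pvBpB_symm (a b : Int) : pvBpB a b = pvBpB b a := by
  simp [pvBpB, abs_sub_comm]

lemma rangeSum_cnt : ∀ (l : List Int),
    ((List.range (l.length - 1)).map (fun k => pvBpB (l.getD k 0) (l.getD (k + 1) 0))).sum
      = pvCnt l := by
  intro l
  induction l with
  | nil => rfl
  | cons a t ih =>
    cases t with
    | nil => rfl
    | cons b t2 =>
      have hlen : (a :: b :: t2).length - 1 = ((b :: t2).length - 1) + 1 := by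
        simp
      rw [hlen, List.range_succ_eq_map]
      simp only [List.map_cons, List.map_map, List.sum_cons]
      have hfun : ((fun k => pvBpB ((a :: b :: t2).getD k 0) ((a :: b :: t2).getD (k + 1) 0)) ∘ Nat.succ)
          = (fun k => pvBpB ((b :: t2).getD k 0) ((b :: t2).getD (k + 1) 0)) := by
        funext k; rfl
      rw [hfun, ih]
      rfl

lemma idxSum_eq_cnt (l : List Int) :
    ((PySem.List.pyRange 0 ((l.length : Int) - 1) 1).map
        (fun i => pvBpB (PySem.List.pyGetD l i 0) (PySem.List.pyGetD l (i + 1) 0))).sum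
      = pvCnt l := by
  cases l with
  | nil =>
    have h0 : PySem.List.pyRange 0 (((List.nil : List Int).length : Int) - 1) 1 = [] := by
      apply PySem.List.pyRange_one_eq_nil
      simp
    rw [h0]
    rfl
  | cons a t =>
    have h1 : ((a :: t).length : Int) - 1 = (t.length : Int) := by
      simp
    rw [h1, PySem.List.pyRange_zero_natCast, List.map_map]
    have h2 : ((fun i => pvBpB (PySem.List.pyGetD (a :: t) i 0) (PySem.List.pyGetD (a :: t) (i + 1) 0))
        ∘ (fun k : Nat => (k : Int)))
        = (fun k : Nat => pvBpB ((a :: t).getD k 0) ((a :: t).getD (k + 1) 0)) := by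
      funext k
      have hc : ((k : Int) + 1) = ((k + 1 : Nat) : Int) := by push_cast; ring
      show pvBpB (PySem.List.pyGetD (a :: t) ((k : Nat) : Int) 0)
          (PySem.List.pyGetD (a :: t) (((k : Nat) : Int) + 1) 0) = _
      rw [hc, PySem.List.pyGetD_natCast, PySem.List.pyGetD_natCast]
    rw [h2]
    have h3 : t.length = (a :: t).length - 1 := by simp
    rw [h3, rangeSum_cnt]

lemma countBreakpointsB_eq_cnt (l : List Int) : pvCountBreakpointsB l = pvCnt l := by
  unfold pvCountBreakpointsB
  rw [PySem.List.foldl_add, zero_add, idxSum_eq_cnt]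

lemma lenBp_eq_cnt (l : List Int) : ((pvGetBreakpointsA l).length : Int) = pvCnt l := by
  rw [← idxSum_eq_cnt]
  unfold pvGetBreakpointsA
  rw [List.length_map, ← List.countP_eq_length_filter, ← PySem.List.sum_map_ite_one_zero]
  congr 1
  apply List.map_congr_left
  intro i _
  simp [pvBpB]

-- ---------- concatenation/reversal laws for pvCnt ----------

def pvJoint (u v : List Int) : Int :=
  match u.getLast?, v.head? with
  | some a, some b => pvBpB a b
  | _, _ => 0

lemma pvJoint_of_eq (u v : List Int) (a b : Int)
    (hu : u.getLast? = some a) (hv : v.head? = some b) : pvJoint u v = pvBpB a b := by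
  simp [pvJoint, hu, hv]

lemma pvJoint_none_left (u v : List Int) (hu : u.getLast? = none) : pvJoint u v = 0 := by
  simp [pvJoint, hu]

lemma pvJoint_none_right (u v : List Int) (hv : v.head? = none) : pvJoint u v = 0 := by
  cases h : u.getLast? <;> simp [pvJoint, h, hv]

lemma pvJoint_append_right (u v w : List Int) (hv : v ≠ []) :
    pvJoint u (v ++ w) = pvJoint u v := by
  rw [pvJoint, pvJoint, List.head?_append_of_ne_nil _ hv]

lemma cnt_append : ∀ (u v : List Int), pvCnt (u ++ v) = pvCnt u + pvCnt v + pvJoint u v := by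
  intro u
  induction u with
  | nil =>
    intro v
    rw [List.nil_append, pvJoint_none_left [] v rfl]
    show pvCnt v = pvCnt [] + pvCnt v + 0
    have : pvCnt ([] : List Int) = 0 := rfl
    rw [this]; ring
  | cons x u ih =>
    intro v
    cases u with
    | nil =>
      cases v with
      | nil =>
        rw [List.append_nil, pvJoint_none_right [x] [] rfl]
        show pvCnt [x] = pvCnt [x] + pvCnt [] + 0
        have : pvCnt ([] : List Int) = 0 := rfl
        rw [this]; ring
      | cons b t =>
        have h1 : pvCnt ([x] ++ b :: t) = pvBpB x b + pvCnt (b :: t) := rfl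
        have h2 : pvJoint [x] (b :: t) = pvBpB x b := rfl
        have h3 : pvCnt [x] = 0 := rfl
        rw [h1, h2, h3]
        ring
    | cons y u2 =>
      have h1 : pvCnt ((x :: y :: u2) ++ v) = pvBpB x y + pvCnt ((y :: u2) ++ v) := rfl
      have h2 : pvCnt (x :: y :: u2) = pvBpB x y + pvCnt (y :: u2) := rfl
      have h3 : pvJoint (x :: y :: u2) v = pvJoint (y :: u2) v := by
        rw [pvJoint, pvJoint, List.getLast?_cons_cons]
      rw [h1, ih v, h2, h3]
      ring

lemma cnt_reverse : ∀ (l : List Int), pvCnt l.reverse = pvCnt l := by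
  intro l
  induction l with
  | nil => rfl
  | cons x l ih =>
    rw [List.reverse_cons, cnt_append, ih]
    cases l with
    | nil => rfl
    | cons y t =>
      have h1 : pvJoint ((y :: t).reverse) [x] = pvBpB y x := by
        apply pvJoint_of_eq
        · rw [List.getLast?_reverse]; rfl
        · rfl
      have h2 : pvCnt (x :: y :: t) = pvBpB x y + pvCnt (y :: t) := rfl
      have h3 : pvCnt [x] = 0 := rfl
      rw [h1, h2, h3, pvBpB_symm]
      ring

-- ---------- the boundary-delta law for a segment reversal ----------

lemma cnt_reversal (s : List Int) (i j : Nat) (hij : i < j) (hj : j < s.length) :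
    pvCnt (s.take i ++ ((s.drop i).take (j + 1 - i)).reverse ++ s.drop (j + 1))
      = pvCnt s
        + (if 0 < i then pvBpB (s.getD (i - 1) 0) (s.getD j 0)
                         - pvBpB (s.getD (i - 1) 0) (s.getD i 0) else 0)
        + (if j + 1 < s.length then pvBpB (s.getD i 0) (s.getD (j + 1) 0)
                         - pvBpB (s.getD j 0) (s.getD (j + 1) 0) else 0) := by
  set A := s.take i with hA
  set B := (s.drop i).take (j + 1 - i) with hB
  set C := s.drop (j + 1) with hC
  have hBlen : B.length = j + 1 - i := by
    rw [hB, List.length_take, List.length_drop]; omega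
  have hBne : B ≠ [] := by
    intro h; rw [h] at hBlen; simp at hBlen; omega
  have hBrevne : B.reverse ≠ [] := by
    simpa using hBne
  have hBC : B ++ C = s.drop i := by
    rw [hB, hC]
    have : s.drop (j + 1) = (s.drop i).drop (j + 1 - i) := by
      rw [List.drop_drop]; congr 1; omega
    rw [this, List.take_append_drop]
  have hs : s = A ++ (B ++ C) := by
    rw [hBC, hA, List.take_append_drop]
  -- heads and lasts of the pieces
  have hBhead : B.head? = some s[i] := by
    rw [List.head?_eq_getElem?, hB, List.getElem?_take, if_pos (by omega), List.getElem?_drop]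
    simp
  have hBlast : B.getLast? = some s[j] := by
    rw [List.getLast?_eq_getElem?, hBlen, hB, List.getElem?_take, if_pos (by omega),
        List.getElem?_drop]
    have : i + (j + 1 - i - 1) = j := by omega
    rw [this]
    simp [List.getElem?_eq_getElem hj]
  have hAlast : 0 < i → A.getLast? = some s[i - 1] := by
    intro hi
    rw [List.getLast?_eq_getElem?, hA, List.length_take]
    have hmin : min i s.length = i := by omega
    rw [hmin, List.getElem?_take, if_pos (by omega)]
    simp [List.getElem?_eq_getElem (by omega : i - 1 < s.length)]
  have hAnil : i = 0 → A = [] := by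
    intro hi; rw [hA, hi]; rfl
  have hChead : ∀ (hjl : j + 1 < s.length), C.head? = some (s[j + 1]'hjl) := by
    intro hjl
    rw [hC, List.head?_drop]
    simp [List.getElem?_eq_getElem hjl]
  have hCnil : ¬ (j + 1 < s.length) → C = [] := by
    intro hjl
    rw [hC, List.drop_eq_nil_iff]
    omega
  -- expand both sides with cnt_append
  have hlhs : pvCnt (A ++ B.reverse ++ C)
      = pvCnt A + pvCnt B + pvCnt C + pvJoint B.reverse C + pvJoint A B.reverse := by
    rw [List.append_assoc, cnt_append, cnt_append, cnt_reverse,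
        pvJoint_append_right _ _ _ hBrevne]
    ring
  have hrhs : pvCnt s = pvCnt A + pvCnt B + pvCnt C + pvJoint B C + pvJoint A B := by
    conv_lhs => rw [hs]
    rw [cnt_append, cnt_append, pvJoint_append_right _ _ _ hBne]
    ring
  rw [hlhs, hrhs]
  -- compute the joints, by cases on the two boundaries
  have hgdj : s.getD j 0 = s[j] := List.getD_eq_getElem s 0 hj
  have hgdi : s.getD i 0 = s[i] := List.getD_eq_getElem s 0 (by omega)
  by_cases hi : 0 < i
  · have hji1 : s.getD (i - 1) 0 = s[i - 1] := List.getD_eq_getElem s 0 (by omega)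
    by_cases hjl : j + 1 < s.length
    · have hgj1 : s.getD (j + 1) 0 = s[j + 1] := List.getD_eq_getElem s 0 hjl
      rw [pvJoint_of_eq A B.reverse s[i-1] s[j] (hAlast hi) (by rw [List.head?_reverse, hBlast]),
          pvJoint_of_eq A B s[i-1] s[i] (hAlast hi) hBhead,
          pvJoint_of_eq B.reverse C s[i] s[j+1] (by rw [List.getLast?_reverse, hBhead]) (hChead hjl),
          pvJoint_of_eq B C s[j] s[j+1] hBlast (hChead hjl),
          if_pos hi, if_pos hjl, hji1, hgj1, hgdj, hgdi]
      ring
    · rw [pvJoint_of_eq A B.reverse s[i-1] s[j] (hAlast hi) (by rw [List.head?_reverse, hBlast]),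
          pvJoint_of_eq A B s[i-1] s[i] (hAlast hi) hBhead,
          pvJoint_none_right B.reverse C (by rw [hCnil hjl]; rfl),
          pvJoint_none_right B C (by rw [hCnil hjl]; rfl),
          if_pos hi, if_neg hjl, hji1, hgdj, hgdi]
      ring
  · by_cases hjl : j + 1 < s.length
    · have hgj1 : s.getD (j + 1) 0 = s[j + 1] := List.getD_eq_getElem s 0 hjl
      rw [pvJoint_none_left A B.reverse (by rw [hAnil (by omega)]; rfl),
          pvJoint_none_left A B (by rw [hAnil (by omega)]; rfl),
          pvJoint_of_eq B.reverse C s[i] s[j+1] (by rw [List.getLast?_reverse, hBhead]) (hChead hjl),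
          pvJoint_of_eq B C s[j] s[j+1] hBlast (hChead hjl),
          if_neg hi, if_pos hjl, hgj1, hgdj, hgdi]
      ring
    · rw [pvJoint_none_left A B.reverse (by rw [hAnil (by omega)]; rfl),
          pvJoint_none_left A B (by rw [hAnil (by omega)]; rfl),
          pvJoint_none_right B.reverse C (by rw [hCnil hjl]; rfl),
          pvJoint_none_right B C (by rw [hCnil hjl]; rfl),
          if_neg hi, if_neg hjl]
      ring

-- B's reversal expression is A's (s[::-1] on a list is List.reverse)
lemma pvReverseA_eq (s : List Int) (i j : Int) :
    pvReverseA s i j =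
      PySem.List.slice s none (some i) ++
        (PySem.List.slice s (some i) (some (j + 1))).reverse ++
        PySem.List.slice s (some (j + 1)) none := by
  simp [pvReverseA, PySem.List.slice?_none_none_neg_one]

-- the count B attaches to the (i,j)-reversal is A's recount
lemma childPair_eq (s : List Int) (base i j : Int)
    (hbase : base = ((pvGetBreakpointsA s).length : Int))
    (h0 : 0 ≤ i) (hij : i < j) (hj : j < (s.length : Int)) :
    pvChildCount s base i j = ((pvGetBreakpointsA (pvReverseA s i j)).length : Int) := by
  have hrev : pvReverseA s i j
      = s.take i.toNat ++ ((s.drop i.toNat).take (j.toNat + 1 - i.toNat)).reverse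
          ++ s.drop (j.toNat + 1) := by
    rw [pvReverseA_eq, PySem.List.slice_to s h0, PySem.List.slice_toNat s h0 (by omega),
        PySem.List.slice_from s (by omega : (0 : Int) ≤ j + 1)]
    have h1 : (j + 1).toNat = j.toNat + 1 := by omega
    rw [h1]
  rw [lenBp_eq_cnt, hrev,
      cnt_reversal s i.toNat j.toNat (by omega) (by omega), ← lenBp_eq_cnt s, ← hbase]
  simp only [pvChildCount]
  -- align the index expressions and the guards
  have hgd : ∀ (k : Int), 0 ≤ k → k < (s.length : Int) →
      PySem.List.pyGetD s k 0 = s.getD k.toNat 0 := by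
    intro k hk0 hk1
    rw [PySem.List.pyGetD_eq_getElem s 0 hk0 hk1, List.getD_eq_getElem s 0 (by omega)]
  have hgi : PySem.List.pyGetD s i 0 = s.getD i.toNat 0 := hgd i h0 (by omega)
  have hgj : PySem.List.pyGetD s j 0 = s.getD j.toNat 0 := hgd j (by omega) hj
  by_cases hi : 0 < i
  · have hgi1 : PySem.List.pyGetD s (i - 1) 0 = s.getD (i.toNat - 1) 0 := by
      rw [hgd (i - 1) (by omega) (by omega)]; congr 1; omega
    by_cases hjl : j < (s.length : Int) - 1
    · have hgj1 : PySem.List.pyGetD s (j + 1) 0 = s.getD (j.toNat + 1) 0 := by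
        rw [hgd (j + 1) (by omega) (by omega)]; congr 1; omega
      rw [if_pos hi, if_pos hjl, if_pos (by omega : 0 < i.toNat),
          if_pos (by omega : j.toNat + 1 < s.length), hgi1, hgi, hgj, hgj1]
      try ring
    · rw [if_pos hi, if_neg hjl, if_pos (by omega : 0 < i.toNat),
          if_neg (by omega : ¬ j.toNat + 1 < s.length), hgi1, hgi, hgj]
      try ring
  · by_cases hjl : j < (s.length : Int) - 1
    · have hgj1 : PySem.List.pyGetD s (j + 1) 0 = s.getD (j.toNat + 1) 0 := by
        rw [hgd (j + 1) (by omega) (by omega)]; congr 1; omega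
      rw [if_neg hi, if_pos hjl, if_neg (by omega : ¬ 0 < i.toNat),
          if_pos (by omega : j.toNat + 1 < s.length), hgi, hgj, hgj1]
      try ring
    · rw [if_neg hi, if_neg hjl, if_neg (by omega : ¬ 0 < i.toNat),
          if_neg (by omega : ¬ j.toNat + 1 < s.length)]
      try ring

-- B's children list is A's (reversal, breakpoint-count) list
lemma childrenB_eq (s : List Int) (base : Int)
    (hbase : base = ((pvGetBreakpointsA s).length : Int)) :
    pvChildrenB s base
      = (pvGetAllReversalsA s).map (fun p => (p, ((pvGetBreakpointsA p).length : Int))) := by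
  unfold pvChildrenB pvGetAllReversalsA
  rw [List.map_flatMap]
  have h1 : ∀ (j : Int) (acc : List (List Int × Int)), j ∈ PySem.List.pyRange 0 (s.length : Int) 1 →
      (PySem.List.pyRange 0 j 1).foldl (fun out i =>
        out ++ [(PySem.List.slice s none (some i) ++
                 ((PySem.List.slice? (PySem.List.slice s (some i) (some (j + 1))) none none (-1)).getD []) ++
                 PySem.List.slice s (some (j + 1)) none, pvChildCount s base i j)]) acc
      = acc ++ (PySem.List.pyRange 0 j 1).map
          (fun i => (pvReverseA s i j, ((pvGetBreakpointsA (pvReverseA s i j)).length : Int))) := by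
    intro j acc hjmem
    have hjb := (PySem.List.mem_pyRange_one).1 hjmem
    rw [PySem.List.foldl_append_singleton_eq_map]
    congr 1
    apply List.map_congr_left
    intro i hi
    have hib := (PySem.List.mem_pyRange_one).1 hi
    have hcp := childPair_eq s base i j hbase (by omega) (by omega) (by omega)
    show (pvReverseA s i j, pvChildCount s base i j) = _
    rw [hcp]
  calc (PySem.List.pyRange 0 (s.length : Int) 1).foldl _ []
      = (PySem.List.pyRange 0 (s.length : Int) 1).foldl (fun out j =>
          out ++ (PySem.List.pyRange 0 j 1).map
            (fun i => (pvReverseA s i j, ((pvGetBreakpointsA (pvReverseA s i j)).length : Int)))) [] := by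
        exact PySem.List.foldl_congr_mem _ _ _ _ (fun out j hj => h1 j out hj)
    _ = _ := by
        rw [PySem.List.foldl_append_eq_flatMap (fun j =>
          (PySem.List.pyRange 0 j 1).map
            (fun i => (pvReverseA s i j, ((pvGetBreakpointsA (pvReverseA s i j)).length : Int))))]
        simp [List.map_map, Function.comp_def]

-- the candidate list of a round, A's shape
def pvNewListA (leaders : List (List Int × Int)) : List (List Int × Int) :=
  (leaders.map (fun sb => pvGetAllReversalsA sb.1)).flatMap (fun ps =>
    ps.map (fun p => (p, ((pvGetBreakpointsA p).length : Int))))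

lemma pvNewListA_eq (leaders : List (List Int × Int)) :
    pvNewListA leaders
      = leaders.flatMap (fun sb =>
          (pvGetAllReversalsA sb.1).map (fun p => (p, ((pvGetBreakpointsA p).length : Int)))) := by
  unfold pvNewListA
  rw [List.flatMap_map]

-- the two rounds build the same candidate list
lemma newList_eq (leaders : List (List Int × Int))
    (hb : ∀ sb ∈ leaders, sb.2 = ((pvGetBreakpointsA sb.1).length : Int)) :
    leaders.flatMap (fun sb => pvChildrenB sb.1 sb.2) = pvNewListA leaders := by
  rw [pvNewListA_eq]
  apply List.flatMap_congr
  intro sb hsb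
  exact childrenB_eq sb.1 sb.2 (hb sb hsb)

-- ---------- the stable sort as count groups in increasing count order ----------

def pvGroups (nl : List (List Int × Int)) (ks : List Int) : List (List Int × Int) :=
  ks.flatMap (fun c => nl.filter (fun pc => pc.2 == c))

lemma pvGroups_nil (ks : List Int) : pvGroups ([] : List (List Int × Int)) ks = [] := by
  simp [pvGroups]

lemma pvGroups_cons (nl : List (List Int × Int)) (c : Int) (ks : List Int) :
    pvGroups nl (c :: ks) = nl.filter (fun pc => pc.2 == c) ++ pvGroups nl ks := by
  simp [pvGroups]

lemma mem_pvGroups (nl : List (List Int × Int)) (ks : List Int) (y : List Int × Int)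
    (hy : y ∈ pvGroups nl ks) : y.2 ∈ ks ∧ y ∈ nl := by
  rw [pvGroups, List.mem_flatMap] at hy
  obtain ⟨c, hc, hy⟩ := hy
  have := List.mem_filter.1 hy
  refine ⟨?_, this.1⟩
  have : y.2 = c := by simpa using this.2
  rw [this]; exact hc

lemma pvGroups_cons_notmem (l : List (List Int × Int)) (a : List Int × Int) (ks : List Int)
    (ha : a.2 ∉ ks) : pvGroups (a :: l) ks = pvGroups l ks := by
  unfold pvGroups
  apply List.flatMap_congr
  intro c hc
  rw [List.filter_cons, if_neg]
  simp only [beq_iff_eq]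
  intro h; exact ha (h ▸ hc)

-- inserting one element into its stable position of the grouped list
lemma groups_insert (a : List Int × Int) (l : List (List Int × Int)) :
    ∀ (ks : List Int) (l₁ l₂ : List (List Int × Int)),
    ks.Pairwise (· < ·) → a.2 ∈ ks →
    pvGroups l ks = l₁ ++ l₂ →
    (∀ b ∈ l₁, b.2 < a.2) → (∀ b ∈ l₂, a.2 ≤ b.2) →
    l₁ ++ a :: l₂ = pvGroups (a :: l) ks := by
  intro ks
  induction ks with
  | nil =>
    intro l₁ l₂ _ ha _ _ _
    simp at ha
  | cons c rest ih =>
    intro l₁ l₂ hpw ha hsplit h1 h2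
    have hck : ∀ c' ∈ rest, c < c' := (List.pairwise_cons.1 hpw).1
    rw [pvGroups_cons] at hsplit
    rw [pvGroups_cons]
    rcases List.mem_cons.1 ha with hac | har
    · -- a's count is the first key: a goes to the front of its group
      have hanotr : a.2 ∉ rest := by
        intro h; have := hck a.2 h; omega
      have hfa : (a :: l).filter (fun pc => pc.2 == c)
          = a :: l.filter (fun pc => pc.2 == c) := by
        rw [List.filter_cons, if_pos (by simp [hac])]
      have hgr : pvGroups (a :: l) rest = pvGroups l rest := pvGroups_cons_notmem l a rest hanotr
      have hl1 : l₁ = [] := by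
        rw [List.eq_nil_iff_forall_not_mem]
        intro x hx
        have hxmem : x ∈ l.filter (fun pc => pc.2 == c) ++ pvGroups l rest := by
          rw [hsplit]; exact List.mem_append_left _ hx
        have hxk : c ≤ x.2 := by
          rcases List.mem_append.1 hxmem with h | h
          · have : x.2 = c := by simpa using (List.mem_filter.1 h).2
            omega
          · have := hck x.2 (mem_pvGroups l rest x h).1
            omega
        have := h1 x hx
        omega
      subst hl1
      rw [List.nil_append] at hsplit
      rw [List.nil_append, hfa, hgr, List.cons_append, hsplit]
    · -- a's count lies further right: peel the first group off l₁
      have hca : c < a.2 := hck a.2 har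
      have hfa : (a :: l).filter (fun pc => pc.2 == c) = l.filter (fun pc => pc.2 == c) := by
        rw [List.filter_cons, if_neg]
        simp only [beq_iff_eq]
        omega
      rcases List.append_eq_append_iff.1 hsplit with ⟨as, has1, has2⟩ | ⟨bs, hbs1, hbs2⟩
      · -- l₁ = filter ++ as,  pvGroups l rest = as ++ l₂
        have hih := ih as l₂ (List.pairwise_cons.1 hpw).2 har has2
          (fun b hb => h1 b (by rw [has1]; exact List.mem_append_right _ hb)) h2
        rw [has1, hfa, List.append_assoc, hih]
      · -- filter = l₁ ++ bs,  l₂ = bs ++ pvGroups l rest ; keys force bs = []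
        have hbs : bs = [] := by
          rw [List.eq_nil_iff_forall_not_mem]
          intro x hx
          have hx1 : x.2 = c := by
            have : x ∈ l.filter (fun pc => pc.2 == c) := by
              rw [hbs1]; exact List.mem_append_right _ hx
            simpa using (List.mem_filter.1 this).2
          have hx2 : a.2 ≤ x.2 := h2 x (by rw [hbs2]; exact List.mem_append_left _ hx)
          omega
        subst hbs
        rw [List.append_nil] at hbs1
        rw [List.nil_append] at hbs2
        have hih := ih [] l₂ (List.pairwise_cons.1 hpw).2 har
          (by rw [List.nil_append]; exact hbs2.symm)
          (by intro b hb; simp at hb) h2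
        rw [hfa, ← hbs1, ← hih, List.nil_append]

-- the stable sort by count is the grouped list
lemma mergeSort_eq_pvGroups (ks : List Int) (hpw : ks.Pairwise (· < ·)) :
    ∀ (nl : List (List Int × Int)), (∀ pc ∈ nl, pc.2 ∈ ks) →
      nl.mergeSort (fun a b => decide (a.2 ≤ b.2)) = pvGroups nl ks := by
  have htrans : ∀ (a b c : List Int × Int),
      (fun a b : List Int × Int => decide (a.2 ≤ b.2)) a b = true →
      (fun a b : List Int × Int => decide (a.2 ≤ b.2)) b c = true →
      (fun a b : List Int × Int => decide (a.2 ≤ b.2)) a c = true := by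
    intro a b c hab hbc
    simp only [decide_eq_true_eq] at *
    omega
  have htotal : ∀ (a b : List Int × Int),
      ((fun a b : List Int × Int => decide (a.2 ≤ b.2)) a b
        || (fun a b : List Int × Int => decide (a.2 ≤ b.2)) b a) = true := by
    intro a b
    simp only [Bool.or_eq_true, decide_eq_true_eq]
    omega
  intro nl
  induction nl with
  | nil => intro _; rw [List.mergeSort_nil, pvGroups_nil]
  | cons a l ih =>
    intro hkeys
    obtain ⟨l₁, l₂, h1, h2, h3⟩ := List.mergeSort_cons htrans htotal a l
    have hsorted := List.pairwise_mergeSort htrans htotal (a :: l)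
    rw [h1] at hsorted
    have hl2 : ∀ b ∈ l₂, a.2 ≤ b.2 := by
      intro b hb
      have hp := (List.pairwise_cons.1 (List.pairwise_append.1 hsorted).2.1).1 b hb
      simpa using hp
    have hl1 : ∀ b ∈ l₁, b.2 < a.2 := by
      intro b hb
      have := h3 b hb
      simp only [Bool.not_eq_eq_eq_not, Bool.not_true, decide_eq_false_iff_not] at this
      omega
    have hgroups : pvGroups l ks = l₁ ++ l₂ := by
      rw [← ih (fun pc hpc => hkeys pc (by simp [hpc])), h2]
    rw [h1]
    exact groups_insert a l ks l₁ l₂ hpw (hkeys a (by simp)) hgroups hl1 hl2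

-- ---------- A's threshold loop as a walk over the sorted distinct counts ----------

def pvTakeGroups (nl : List (List Int × Int)) (N : Int) :
    List Int → List (List Int × Int) → List (List Int × Int)
  | [], result => result
  | c :: rest, result =>
    if N ≤ (result.length : Int) then result
    else pvTakeGroups nl N rest (result ++ nl.filter (fun pc => pc.2 == c))

-- counting entries at, at-least and above a threshold
lemma countSplit (nl : List (List Int × Int)) (m : Int) :
    (nl.filter (fun pc => decide (m ≤ pc.2))).length
      = (nl.filter (fun pc => pc.2 == m)).length
        + (nl.filter (fun pc => decide (m + 1 ≤ pc.2))).length := by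
  induction nl with
  | nil => simp
  | cons x t ih =>
    simp only [List.filter_cons]
    by_cases h1 : m ≤ x.2
    · by_cases h2 : x.2 = m
      · rw [if_pos (by simpa using h1), if_pos (by simpa using h2),
            if_neg (by simp only [decide_eq_true_eq]; omega)]
        simp only [List.length_cons, ih]; omega
      · rw [if_pos (by simpa using h1), if_neg (by simpa using h2),
            if_pos (by simp only [decide_eq_true_eq]; omega)]
        simp only [List.length_cons, ih]; omega
    · rw [if_neg (by simpa using h1), if_neg (by simp only [beq_iff_eq]; omega),
          if_neg (by simp only [decide_eq_true_eq]; omega)]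
      exact ih

-- A's threshold loop is the walk over the sorted distinct counts
lemma whileA_eq_takeGroups (nl : List (List Int × Int)) (N : Int) :
    ∀ (fuel : Nat) (m : Int) (ks : List Int) (result : List (List Int × Int)),
    ks.Pairwise (· < ·) →
    (∀ c ∈ ks, m ≤ c) →
    (∀ c, m ≤ c → (c ∈ ks ↔ c ∈ nl.map (fun pc => pc.2))) →
    (∀ c ∈ ks, c < m + fuel) →
    N ≤ (result.length : Int) + ((nl.filter (fun pc => decide (m ≤ pc.2))).length : Int) →
    pvWhileA nl N fuel m result = pvTakeGroups nl N ks result := by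
  intro fuel
  induction fuel with
  | zero =>
    intro m ks result _ hge _ hfuel _
    have hks : ks = [] := by
      cases ks with
      | nil => rfl
      | cons k rest =>
        exfalso
        have h1 := hfuel k (by simp)
        have h2 := hge k (by simp)
        omega
    subst hks; rfl
  | succ fuel ih =>
    intro m ks result hpw hge hiff hfuel htot
    by_cases hlen : (result.length : Int) < N
    · -- loop body runs
      cases ks with
      | nil =>
        -- no counts ≥ m exist at all: contradiction with htot
        exfalso
        have hfe : nl.filter (fun pc => decide (m ≤ pc.2)) = [] := by
          rw [List.filter_eq_nil_iff]
          intro pc hpc hle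
          have : pc.2 ∈ nl.map (fun pc => pc.2) := List.mem_map_of_mem hpc
          exact absurd (((hiff pc.2 (by simpa using hle)).2 this)) (by simp)
        rw [hfe] at htot
        simp at htot
        omega
      | cons k rest =>
        have hmk : m ≤ k := hge k (by simp)
        rcases lt_or_eq_of_le hmk with hlt | heq
        · -- m is not a present count: A appends nothing and moves on
          have hmnot : m ∉ nl.map (fun pc => pc.2) := by
            intro hmem
            have : m ∈ k :: rest := (hiff m le_rfl).2 hmem
            rcases List.mem_cons.1 this with hm | hm
            · omega
            · have hk : ∀ c ∈ rest, k < c := by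
                intro c hc; exact (List.pairwise_cons.1 hpw).1 c hc
              have := hk m hm; omega
          have hfm : nl.filter (fun pc => pc.2 == m) = [] := by
            rw [List.filter_eq_nil_iff]
            intro pc hpc hbeq
            exact hmnot (by
              have : pc.2 = m := by simpa using hbeq
              rw [← this]; exact List.mem_map_of_mem hpc)
          have hstep : pvWhileA nl N (fuel + 1) m result = pvWhileA nl N fuel (m + 1) result := by
            rw [pvWhileA]; rw [if_pos hlen, hfm, List.append_nil]
          rw [hstep]
          apply ih (m + 1) (k :: rest) result hpw
          · intro c hc
            have := hge c hc
            rcases List.mem_cons.1 hc with hc' | hc'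
            · omega
            · have hk : ∀ c ∈ rest, k < c := fun c hc => (List.pairwise_cons.1 hpw).1 c hc
              have := hk c hc'; omega
          · intro c hc; exact hiff c (by omega)
          · intro c hc; have := hfuel c hc; omega
          · have : (nl.filter (fun pc => decide (m + 1 ≤ pc.2))).length
                = (nl.filter (fun pc => decide (m ≤ pc.2))).length := by
              have := countSplit nl m
              rw [hfm] at this; simpa using this.symm
            rw [this]; exact htot
        · -- m = k is the next present count: both append the group
          subst heq
          have hstep : pvWhileA nl N (fuel + 1) m result
              = pvWhileA nl N fuel (m + 1) (result ++ nl.filter (fun pc => pc.2 == m)) := by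
            rw [pvWhileA]; rw [if_pos hlen]
          have hstepB : pvTakeGroups nl N (m :: rest) result
              = pvTakeGroups nl N rest (result ++ nl.filter (fun pc => pc.2 == m)) := by
            rw [pvTakeGroups]; rw [if_neg (by omega)]
          rw [hstep, hstepB]
          have hk : ∀ c ∈ rest, m < c := fun c hc => (List.pairwise_cons.1 hpw).1 c hc
          apply ih (m + 1) rest _ ((List.pairwise_cons.1 hpw).2)
          · intro c hc; have := hk c hc; omega
          · intro c hc
            constructor
            · intro h; exact (hiff c (by omega)).1 (by simp [List.mem_cons]; right; exact h)
            · intro h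
              have := (hiff c (by omega)).2 h
              rcases List.mem_cons.1 this with h' | h'
              · omega
              · exact h'
          · intro c hc; have := hfuel c (by simp [List.mem_cons]; right; exact hc); omega
          · have hsplit := countSplit nl m
            simp only [List.length_append]
            push_cast
            omega
    · -- loop exits; the walk returns result too
      rw [pvWhileA, if_neg hlen]
      cases ks with
      | nil => rfl
      | cons k rest => rw [pvTakeGroups, if_pos (by omega)]

-- the group walk is the tie-keeping cut of the grouped list at the N-th smallest count
lemma takeGroups_eq_filter (nl : List (List Int × Int)) (N : Int) (hN : 1 ≤ N)
    (ordered : List (List Int × Int)) (hlen : N ≤ (ordered.length : Int))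
    (cstop : Int) (hc : cstop = (ordered.getD (N - 1).toNat ([], 0)).2) :
    ∀ (ks : List Int) (result : List (List Int × Int)),
      ordered = result ++ pvGroups nl ks →
      ks.Pairwise (· < ·) →
      (∀ y ∈ result, ∀ c ∈ ks, y.2 < c) →
      ((result.length : Int) < N ∨ result = ordered.filter (fun pc => decide (pc.2 ≤ cstop))) →
      pvTakeGroups nl N ks result = ordered.filter (fun pc => decide (pc.2 ≤ cstop)) := by
  intro ks
  induction ks with
  | nil =>
    intro result hord _ _ hdisj
    rw [pvGroups, List.flatMap_nil, List.append_nil] at hord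
    rcases hdisj with h | h
    · exfalso; rw [hord] at hlen; omega
    · exact h
  | cons c rest ih =>
    intro result hord hpw hsep hdisj
    by_cases hstop : N ≤ (result.length : Int)
    · rw [pvTakeGroups, if_pos hstop]
      rcases hdisj with h | h
      · omega
      · exact h
    · rw [pvTakeGroups, if_neg hstop]
      have hck : ∀ c' ∈ rest, c < c' := (List.pairwise_cons.1 hpw).1
      set g := nl.filter (fun pc => pc.2 == c) with hg
      have hgkey : ∀ y ∈ g, y.2 = c := by
        intro y hy; simpa using (List.mem_filter.1 hy).2
      have hordg : ordered = (result ++ g) ++ pvGroups nl rest := by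
        rw [hord, pvGroups_cons, ← hg, List.append_assoc]
      have hsep' : ∀ y ∈ result ++ g, ∀ c' ∈ rest, y.2 < c' := by
        intro y hy c' hc'
        rcases List.mem_append.1 hy with h | h
        · exact hsep y h c' (by simp [hc'])
        · rw [hgkey y h]; exact hck c' hc'
      apply ih (result ++ g) hordg (List.pairwise_cons.1 hpw).2 hsep'
      by_cases h2 : ((result ++ g).length : Int) < N
      · exact Or.inl h2
      · right
        have hrg : (result.length : Int) + (g.length : Int) = ((result ++ g).length : Int) := by
          simp [List.length_append]
        -- the index N-1 lands inside g, so the cut count is c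
        have hk1 : result.length ≤ (N - 1).toNat := by omega
        have hk2 : (N - 1).toNat < (result ++ g).length := by
          rw [List.length_append]; omega
        have hcv : cstop = c := by
          rw [hc, hordg, List.getD_append _ _ _ _ hk2,
              List.getD_append_right _ _ _ _ hk1]
          have hm : (N - 1).toNat - result.length < g.length := by
            rw [List.length_append] at hk2; omega
          rw [List.getD_eq_getElem _ _ hm]
          exact hgkey _ (List.getElem_mem hm)
        rw [hcv, hordg, List.filter_append, List.filter_append]
        have f1 : result.filter (fun pc => decide (pc.2 ≤ c)) = result := by
          rw [List.filter_eq_self]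
          intro y hy
          have := hsep y hy c (by simp)
          simp only [decide_eq_true_eq]
          omega
        have f2 : g.filter (fun pc => decide (pc.2 ≤ c)) = g := by
          rw [List.filter_eq_self]
          intro y hy
          simp [hgkey y hy]
        have f3 : (pvGroups nl rest).filter (fun pc => decide (pc.2 ≤ c)) = [] := by
          rw [List.filter_eq_nil_iff]
          intro y hy
          have := hck y.2 (mem_pvGroups nl rest y hy).1
          simp only [decide_eq_true_eq]
          omega
        rw [f1, f2, f3, List.append_nil]

-- ---------- reused facts about A's loop and candidate lists ----------

-- A's loop returns at least N entries
lemma whileA_length (nl : List (List Int × Int)) (N : Int) :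
    ∀ (fuel : Nat) (m : Int) (result : List (List Int × Int)),
    (∀ c ∈ nl.map (fun pc => pc.2), m ≤ c → c < m + fuel) →
    N ≤ (result.length : Int) + ((nl.filter (fun pc => decide (m ≤ pc.2))).length : Int) →
    N ≤ ((pvWhileA nl N fuel m result).length : Int) := by
  intro fuel
  induction fuel with
  | zero =>
    intro m result hfuel htot
    have hfe : nl.filter (fun pc => decide (m ≤ pc.2)) = [] := by
      rw [List.filter_eq_nil_iff]
      intro pc hpc hle
      have h1 := hfuel pc.2 (List.mem_map_of_mem hpc) (by simpa using hle)
      have h2 : m ≤ pc.2 := by simpa using hle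
      omega
    rw [hfe] at htot
    simpa [pvWhileA] using htot
  | succ fuel ih =>
    intro m result hfuel htot
    rw [pvWhileA]
    by_cases hlen : (result.length : Int) < N
    · rw [if_pos hlen]
      apply ih (m + 1)
      · intro c hc hle; have := hfuel c hc (by omega); omega
      · have hsplit := countSplit nl m
        simp only [List.length_append]
        push_cast
        omega
    · rw [if_neg hlen]; omega

lemma whileA_mem (nl : List (List Int × Int)) (N : Int) :
    ∀ (fuel : Nat) (m : Int) (result : List (List Int × Int)) (x : List Int × Int),
    x ∈ pvWhileA nl N fuel m result → x ∈ result ∨ x ∈ nl := by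
  intro fuel
  induction fuel with
  | zero => intro m result x hx; exact Or.inl hx
  | succ fuel ih =>
    intro m result x hx
    rw [pvWhileA] at hx
    by_cases hlen : (result.length : Int) < N
    · rw [if_pos hlen] at hx
      rcases ih (m + 1) _ x hx with h | h
      · rcases List.mem_append.1 h with h' | h'
        · exact Or.inl h'
        · exact Or.inr (List.mem_of_mem_filter h')
      · exact Or.inr h
    · rw [if_neg hlen] at hx; exact Or.inl hx

-- 2 * |get_all_reversals s| = n * (n-1)
lemma sum_pyRange_toNat : ∀ (n : Nat),
    2 * (((PySem.List.pyRange 0 (n : Int) 1).map (fun j => j.toNat)).sum) = n * (n - 1) := by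
  intro n
  induction n with
  | zero => simp [PySem.List.pyRange_one_eq_nil]
  | succ n ih =>
    rw [show ((n + 1 : Nat) : Int) = (n : Int) + 1 from Nat.cast_succ n,
        PySem.List.pyRange_one_succ_right (by positivity)]
    simp only [List.map_append, List.sum_append, List.map_cons, List.map_nil, List.sum_cons,
      List.sum_nil, Int.toNat_natCast]
    have hmul : (n + 1) * (n + 1 - 1) = n * (n - 1) + 2 * n := by
      cases n with
      | zero => rfl
      | succ p => simp only [Nat.add_sub_cancel]; ring
    omega

lemma length_getAllReversalsA (s : List Int) :
    2 * (pvGetAllReversalsA s).length = s.length * (s.length - 1) := by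
  unfold pvGetAllReversalsA
  rw [List.length_flatMap]
  have : ((PySem.List.pyRange 0 (s.length : Int) 1).map
        (fun j => ((PySem.List.pyRange 0 j 1).map (fun i => pvReverseA s i j)).length)).sum
      = ((PySem.List.pyRange 0 (s.length : Int) 1).map (fun j => j.toNat)).sum := by
    congr 1
    apply List.map_congr_left
    intro j _
    simp [PySem.List.length_pyRange_one]
  rw [this, sum_pyRange_toNat]

-- every reversal of s keeps its length (indices from the comprehension ranges)
lemma length_pvReverseA (s : List Int) (i j : Int) (h0 : 0 ≤ i) (hij : i < j)
    (hj : j < (s.length : Int)) : (pvReverseA s i j).length = s.length := by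
  rw [pvReverseA_eq]
  rw [PySem.List.slice_to s h0, PySem.List.slice_toNat s h0 (by omega),
      PySem.List.slice_from s (by omega : (0:Int) ≤ j + 1)]
  simp only [List.length_append, List.length_take, List.length_reverse, List.length_drop,
    List.length_take]
  omega

lemma mem_getAllReversalsA (s : List Int) (p : List Int) (hp : p ∈ pvGetAllReversalsA s) :
    p.length = s.length := by
  unfold pvGetAllReversalsA at hp
  rw [List.mem_flatMap] at hp
  obtain ⟨j, hj, hp⟩ := hp
  rw [List.mem_map] at hp
  obtain ⟨i, hi, rfl⟩ := hp
  have hjb := (PySem.List.mem_pyRange_one).1 hj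
  have hib := (PySem.List.mem_pyRange_one).1 hi
  exact length_pvReverseA s i j (by omega) (by omega) (by omega)

lemma getAllReversalsA_ne_nil (s : List Int) (hs : 2 ≤ s.length) :
    1 ≤ (pvGetAllReversalsA s).length := by
  have h1 := length_getAllReversalsA s
  have h2 : 2 * 1 ≤ s.length * (s.length - 1) := Nat.mul_le_mul hs (by omega)
  omega

-- breakpoint counts are below the length of the sequence
lemma breakpoints_length_le (p : List Int) :
    (pvGetBreakpointsA p).length ≤ ((p.length : Int) - 1).toNat := by
  unfold pvGetBreakpointsA
  rw [List.length_map]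
  calc ((PySem.List.pyRange 0 ((p.length : Int) - 1) 1).filter _).length
      ≤ (PySem.List.pyRange 0 ((p.length : Int) - 1) 1).length := List.length_filter_le _ _
    _ = ((p.length : Int) - 1).toNat := by rw [PySem.List.length_pyRange_one]; ring_nf

lemma flatMap_length_ge {α β : Type} (l : List α) (f : α → List β)
    (h : ∀ x ∈ l, 1 ≤ (f x).length) : l.length ≤ (l.flatMap f).length := by
  induction l with
  | nil => simp
  | cons x t ih =>
    rw [List.flatMap_cons, List.length_append, List.length_cons]
    have h1 := h x (by simp)
    have h2 := ih (fun y hy => h y (by simp [hy]))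
    omega

lemma pvNewListA_mem (leaders : List (List Int × Int)) (n : Nat) (hn : 1 ≤ n)
    (hl : ∀ sb ∈ leaders, sb.1.length = n) (pc : List Int × Int) (hpc : pc ∈ pvNewListA leaders) :
    pc.1.length = n ∧ 0 ≤ pc.2 ∧ pc.2 ≤ (n : Int) - 1 := by
  rw [pvNewListA_eq, List.mem_flatMap] at hpc
  obtain ⟨sb, hsb, hpc⟩ := hpc
  rw [List.mem_map] at hpc
  obtain ⟨p, hpmem, rfl⟩ := hpc
  have hlen : p.length = n := by rw [mem_getAllReversalsA sb.1 p hpmem]; exact hl sb hsb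
  refine ⟨hlen, by positivity, ?_⟩
  have hb := breakpoints_length_le p
  rw [hlen] at hb
  show (((pvGetBreakpointsA p).length : Nat) : Int) ≤ (n : Int) - 1
  omega

lemma pvNewListA_form (leaders : List (List Int × Int)) (pc : List Int × Int)
    (hpc : pc ∈ pvNewListA leaders) : pc.2 = ((pvGetBreakpointsA pc.1).length : Int) := by
  rw [pvNewListA_eq, List.mem_flatMap] at hpc
  obtain ⟨sb, _, hpc⟩ := hpc
  rw [List.mem_map] at hpc
  obtain ⟨p, _, rfl⟩ := hpc
  rfl

lemma pvNewListA_length_ge (leaders : List (List Int × Int)) (n : Nat) (hn : 2 ≤ n)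
    (hl : ∀ sb ∈ leaders, sb.1.length = n) :
    leaders.length ≤ (pvNewListA leaders).length := by
  rw [pvNewListA_eq]
  apply flatMap_length_ge
  intro sb hsb
  rw [List.length_map]
  exact getAllReversalsA_ne_nil sb.1 (by rw [hl sb hsb]; exact hn)

-- ---------- one round: the two create_leaders agree ----------

lemma createLeaders_eq (N : Int) (n : Nat) (hn : 2 ≤ n) (hN : 1 ≤ N)
    (leaders : List (List Int × Int))
    (hl : ∀ sb ∈ leaders, sb.1.length = n)
    (hb : ∀ sb ∈ leaders, sb.2 = ((pvGetBreakpointsA sb.1).length : Int))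
    (hcount : N ≤ ((pvNewListA leaders).length : Int)) :
    pvCreateLeadersA N (n + 1) leaders = pvCreateLeadersB N leaders ∧
    N ≤ ((pvCreateLeadersA N (n + 1) leaders).length : Int) ∧
    (∀ pc ∈ pvCreateLeadersA N (n + 1) leaders, pc ∈ pvNewListA leaders) := by
  set nl := pvNewListA leaders with hnl
  have hnlne : nl ≠ [] := by
    intro h
    rw [h] at hcount; simp at hcount; omega
  obtain ⟨m, hm⟩ : ∃ m, PySem.List.min? (nl.map (fun pc => pc.2)) (fun c => c) = some m := by
    cases hmin : PySem.List.min? (nl.map (fun pc => pc.2)) (fun c => c) with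
    | none =>
      rw [PySem.List.min?_eq_none_iff] at hmin
      exact absurd (List.map_eq_nil_iff.1 hmin) hnlne
    | some m => exact ⟨m, rfl⟩
  have hmin_le : ∀ c ∈ nl.map (fun pc => pc.2), m ≤ c := by
    intro c hc; exact PySem.List.min?_isMin hm c hc
  have hm0 : 0 ≤ m := by
    have := PySem.List.min?_mem hm
    rw [List.mem_map] at this
    obtain ⟨pc, hpc, rfl⟩ := this
    exact (pvNewListA_mem leaders n (by omega) hl pc hpc).2.1
  have hcbound : ∀ c ∈ nl.map (fun pc => pc.2), c < m + (n + 1 : Nat) := by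
    intro c hc
    rw [List.mem_map] at hc
    obtain ⟨pc, hpc, rfl⟩ := hc
    have h1 := (pvNewListA_mem leaders n (by omega) hl pc hpc).2.2
    push_cast
    omega
  have hfilterall : nl.filter (fun pc => decide (m ≤ pc.2)) = nl := by
    rw [List.filter_eq_self]
    intro pc hpc
    simpa using hmin_le pc.2 (List.mem_map_of_mem hpc)
  have hAdef : pvCreateLeadersA N (n + 1) leaders = pvWhileA nl N (n + 1) m [] := by
    unfold pvCreateLeadersA
    simp only []
    rw [show (leaders.map (fun sb => pvGetAllReversalsA sb.1)).flatMap (fun ps =>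
      ps.map (fun p => (p, ((pvGetBreakpointsA p).length : Int)))) = pvNewListA leaders from rfl]
    rw [← hnl, hm]
  have htot : N ≤ ((([] : List (List Int × Int)).length : Int)
      + ((nl.filter (fun pc => decide (m ≤ pc.2))).length : Int)) := by
    rw [hfilterall]; simpa using hcount
  -- the sorted distinct counts
  set ks := PySem.List.sorted (PySem.Set.ofList (nl.map (fun pc => pc.2))) (fun c => c) with hks
  have hkspw : ks.Pairwise (· < ·) := PySem.List.sorted_ofList_pairwise_lt _
  have hksmem : ∀ c, c ∈ ks ↔ c ∈ nl.map (fun pc => pc.2) := by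
    intro c
    rw [hks, PySem.List.mem_sorted]
    exact PySem.Set.mem_ofList _ _
  set ordered := nl.mergeSort (fun a b => decide (a.2 ≤ b.2)) with hord
  have hordg : ordered = pvGroups nl ks := by
    rw [hord]
    exact mergeSort_eq_pvGroups ks hkspw nl
      (fun pc hpc => (hksmem pc.2).2 (List.mem_map_of_mem hpc))
  have hordlen : ordered.length = nl.length := by
    rw [hord, List.length_mergeSort]
  set cstop := (ordered.getD (N - 1).toNat ([], 0)).2 with hcstop
  have hAeq : pvCreateLeadersA N (n + 1) leaders
      = ordered.filter (fun pc => decide (pc.2 ≤ cstop)) := by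
    rw [hAdef,
        whileA_eq_takeGroups nl N (n + 1) m ks [] hkspw
          (fun c hc => hmin_le c ((hksmem c).1 hc))
          (fun c _ => hksmem c)
          (fun c hc => hcbound c ((hksmem c).1 hc)) htot]
    exact takeGroups_eq_filter nl N hN ordered (by rw [hordlen]; exact hcount) cstop rfl ks []
      (by rw [hordg]; rfl) hkspw (by intro y hy; simp at hy) (Or.inl (by simp; omega))
  have hBeq : pvCreateLeadersB N leaders
      = ordered.filter (fun pc => decide (pc.2 ≤ cstop)) := by
    unfold pvCreateLeadersB
    rw [newList_eq leaders hb, ← hnl, ← hord]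
    have hidx : PySem.List.pyGetD ordered (N - 1) ([], 0)
        = ordered.getD (N - 1).toNat ([], 0) := by
      rw [PySem.List.pyGetD_eq_getElem ordered ([], 0) (by omega)
            (by rw [hordlen]; omega),
          List.getD_eq_getElem _ _ (by rw [hordlen]; omega)]
    show ordered.filter (fun pc => decide (pc.2 ≤ (PySem.List.pyGetD ordered (N - 1) ([], 0)).2)) = _
    rw [hidx, ← hcstop]
  refine ⟨by rw [hAeq, hBeq], ?_, ?_⟩
  · rw [hAdef]
    exact whileA_length _ _ _ _ _ (fun c hc _ => hcbound c hc) htot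
  · intro pc hpc
    rw [hAdef] at hpc
    rcases whileA_mem _ _ _ _ _ _ hpc with h | h
    · simp at h
    · exact h

-- ---------- outer loop agreement ----------

lemma loopAB (n : Nat) (N : Int) (hn : 2 ≤ n) (hN : 1 ≤ N) :
    ∀ (k : Nat) (dist : Int) (leaders : List (List Int × Int)),
    (∀ sb ∈ leaders, sb.1.length = n) →
    (∀ sb ∈ leaders, sb.2 = ((pvGetBreakpointsA sb.1).length : Int)) →
    N ≤ ((pvNewListA leaders).length : Int) →
    pvLoopA N (n + 1) k dist leaders = pvRunB N k dist leaders := by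
  intro k
  induction k with
  | zero => intro dist leaders _ _ _; rfl
  | succ k ih =>
    intro dist leaders hl hb hcount
    obtain ⟨heq, hlen, hmem⟩ := createLeaders_eq N n hn hN leaders hl hb hcount
    have hlmem : ∀ sb ∈ pvCreateLeadersA N (n + 1) leaders, sb.1.length = n := by
      intro sb hsb
      exact (pvNewListA_mem leaders n (by omega) hl sb (hmem sb hsb)).1
    have hbmem : ∀ sb ∈ pvCreateLeadersA N (n + 1) leaders,
        sb.2 = ((pvGetBreakpointsA sb.1).length : Int) := by
      intro sb hsb
      exact pvNewListA_form leaders sb (hmem sb hsb)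
    have hcount' : N ≤ ((pvNewListA (pvCreateLeadersA N (n + 1) leaders)).length : Int) := by
      have h1 := pvNewListA_length_ge (pvCreateLeadersA N (n + 1) leaders) n hn hlmem
      calc N ≤ ((pvCreateLeadersA N (n + 1) leaders).length : Int) := hlen
        _ ≤ _ := by exact_mod_cast h1
    rw [pvLoopA, pvRunB, ← heq]
    cases hM : pvCreateLeadersA N (n + 1) leaders with
    | nil => rfl
    | cons hd tl =>
      obtain ⟨s, b⟩ := hd
      simp only []
      cases hbz : (b == 0) with
      | true =>
        simp only [if_pos]
        split_ifs <;> omega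
      | false =>
        simp only [Bool.false_eq_true, if_false]
        rw [← hM]
        exact ih (dist + 1) _ hlmem hbmem hcount'

-- ===== VERDICT (by name: the statement is the Claim_ definition above) =====
theorem leaderBoardSort_spec : Claim_equal_leaderBoardSort := by
  intro S N _ hpre
  unfold Spec_leaderBoardSort leaderBoardSort leaderBoardSort_alt
  rcases hpre with hS | ⟨hn, hN, hNN⟩
  · subst hS; rfl
  · rw [show pvCountBreakpointsB S = ((pvGetBreakpointsA S).length : Int) by
      rw [countBreakpointsB_eq_cnt, lenBp_eq_cnt]]
    apply loopAB S.length N hn hN S.length 0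
    · intro sb hsb
      rw [List.mem_singleton] at hsb
      rw [hsb]
    · intro sb hsb
      rw [List.mem_singleton] at hsb
      rw [hsb]
    · have h1 : (pvNewListA [(S, ((pvGetBreakpointsA S).length : Int))]).length
          = (pvGetAllReversalsA S).length := by
        rw [pvNewListA_eq]; simp
      have h2 := length_getAllReversalsA S
      have hc : ((S.length : Int)) * ((S.length : Int) - 1)
          = ((S.length * (S.length - 1) : Nat) : Int) := by
        push_cast [Nat.cast_sub (by omega : 1 ≤ S.length)]
        ring
      rw [hc] at hNN
      rw [h1]
      omega
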